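-- pv_equiv track=rewrite | github.com/posl/comment_recommendation | script/mod_gen/4_time/zh/246_D/8.py | f
-- ===== SOURCE A (Python) =====
-- def f(n):
--     # 二分法
--     l = 0
--     r = 10 ** 18
--     while r - l > 1:
--         m = (l + r) // 2
--         if m ** 3 < n:
--             l = m
--         else:
--             r = m
--     return r
-- ===== SOURCE B (Python) =====
-- def f(n):
--     # linear scan for the least c >= 1 with c**3 >= n (simpler; exact on |n| <= 2**31)
--     c = 1
--     while c * c * c < n:
--         c += 1
--     return c
-- ===== Notes on version B (the rewrite author's own statement) =====
-- stated objective: simpler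
-- what changed: Replaces the fixed-interval bisection with a direct increment-until-cube-reaches-n scan, which returns the same least cube-ceiling value on the whole domain.
import Mathlib
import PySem

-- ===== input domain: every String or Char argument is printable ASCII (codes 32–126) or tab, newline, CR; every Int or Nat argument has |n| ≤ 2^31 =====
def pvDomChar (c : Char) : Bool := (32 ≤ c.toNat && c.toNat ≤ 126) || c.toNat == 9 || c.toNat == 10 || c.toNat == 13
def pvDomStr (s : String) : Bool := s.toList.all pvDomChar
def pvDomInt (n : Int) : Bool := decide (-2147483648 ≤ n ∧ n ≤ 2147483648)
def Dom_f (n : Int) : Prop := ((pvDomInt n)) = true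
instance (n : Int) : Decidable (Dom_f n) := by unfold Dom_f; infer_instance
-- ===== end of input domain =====

-- B replaces A's fixed [0,10^18] bisection by a direct increment-until-cube-reaches-n scan from 1 (simpler; same value on the whole domain).

-- ===== PORT A =====
-- while r - l > 1: m = (l+r)//2; if m**3 < n: l = m else r = m
def loopA (n l r : Int) : Int :=
  if r - l > 1 then
    let m := PySem.Int.floordiv (l + r) 2
    if m ^ 3 < n then loopA n m r else loopA n l m
  else r
termination_by (r - l).toNat
decreasing_by
  · have h1 : l + 1 ≤ PySem.Int.floordiv (l + r) 2 :=
      (PySem.Int.le_floordiv_iff_mul_le (by norm_num)).mpr (by omega)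
    have h2 : PySem.Int.floordiv (l + r) 2 < r :=
      (PySem.Int.floordiv_lt_iff_lt_mul (by norm_num)).mpr (by omega)
    omega
  · have h1 : l + 1 ≤ PySem.Int.floordiv (l + r) 2 :=
      (PySem.Int.le_floordiv_iff_mul_le (by norm_num)).mpr (by omega)
    have h2 : PySem.Int.floordiv (l + r) 2 < r :=
      (PySem.Int.floordiv_lt_iff_lt_mul (by norm_num)).mpr (by omega)
    omega

def f (n : Int) : Int := loopA n 0 (10 ^ 18)

-- ===== PORT B =====
-- c = 1; while c*c*c < n: c += 1; return c
def scanB (n c : Int) : Int :=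
  if c * c * c < n then scanB n (c + 1) else c
termination_by (n - c * c * c).toNat
decreasing_by
  have h : c * c * c < (c + 1) * (c + 1) * (c + 1) := by nlinarith [sq_nonneg c]
  omega

def f_alt (n : Int) : Int := scanB n 1

-- ===== PRECONDITION & SPEC =====
def Spec_f (n : Int) (out : Int) : Prop := out = f_alt n
instance (n : Int) (out : Int) : Decidable (Spec_f n out) := by unfold Spec_f; infer_instance

-- ===== CLAIM (what is proved, stated in full; the proofs are below) =====
def Claim_equal_f : Prop := ∀ (n : Int), Dom_f n → Spec_f n (f n)

-- ===== LEMMAS AND PROOFS =====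

lemma cube_lt_cube {a b : Int} (h : a < b) : a ^ 3 < b ^ 3 := by
  nlinarith [sq_nonneg (a + b), sq_nonneg a, sq_nonneg b]

lemma cube_le_cube {a b : Int} (h : a ≤ b) : a ^ 3 ≤ b ^ 3 := by
  rcases lt_or_eq_of_le h with h' | h'
  · exact le_of_lt (cube_lt_cube h')
  · simp [h']

lemma scanB_ge (n c : Int) : c ≤ scanB n c := by
  fun_induction scanB with
  | case1 c h ih => omega
  | case2 c h => exact le_refl _

lemma scanB_cube (n c : Int) : n ≤ scanB n c ^ 3 := by
  fun_induction scanB with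
  | case1 c h ih => exact ih
  | case2 c h => have : c ^ 3 = c * c * c := by ring
                 omega

lemma scanB_min (n c : Int) : ∀ k, c ≤ k → k < scanB n c → k ^ 3 < n := by
  fun_induction scanB with
  | case1 c h ih =>
      intro k hck hk
      rcases eq_or_lt_of_le hck with h' | h'
      · subst h'
        have : c ^ 3 = c * c * c := by ring
        omega
      · exact ih k (by omega) hk
  | case2 c h =>
      intro k hck hk
      omega

lemma loopA_eq (n t : Int) (_ht1 : 1 ≤ t) (htc : n ≤ t ^ 3)
    (hmin : ∀ k, 1 ≤ k → k < t → k ^ 3 < n) :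
    ∀ N l r, (r - l).toNat ≤ N → 0 ≤ l → l < t → t ≤ r → loopA n l r = t := by
  intro N
  induction N with
  | zero => intro l r hN hl hlt htr; omega
  | succ N ih =>
    intro l r hN hl hlt htr
    rw [loopA]
    by_cases hgt : r - l > 1
    · simp only [hgt, if_true]
      have h1 : l + 1 ≤ PySem.Int.floordiv (l + r) 2 :=
        (PySem.Int.le_floordiv_iff_mul_le (by norm_num)).mpr (by omega)
      have h2 : PySem.Int.floordiv (l + r) 2 < r :=
        (PySem.Int.floordiv_lt_iff_lt_mul (by norm_num)).mpr (by omega)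
      set m := PySem.Int.floordiv (l + r) 2 with hm
      by_cases hc : m ^ 3 < n
      · simp only [hc, if_true]
        have hmt : m < t := by
          by_contra hle
          have : t ≤ m := by omega
          have := cube_le_cube this
          omega
        exact ih m r (by omega) (by omega) hmt htr
      · simp only [hc, if_false]
        have htm : t ≤ m := by
          by_contra hle
          have : m < t := by omega
          have := hmin m (by omega) this
          omega
        exact ih l m (by omega) hl hlt htm
    · simp only [hgt, if_false]
      omega

-- ===== VERDICT (by name: the statement is the Claim_ definition above) =====
theorem f_spec : Claim_equal_f := by
  intro n hdom
  have hb : -2147483648 ≤ n ∧ n ≤ 2147483648 := by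
    simpa [Dom_f, pvDomInt] using hdom
  unfold Spec_f f f_alt
  have ht1 : (1 : Int) ≤ scanB n 1 := scanB_ge n 1
  have htc : n ≤ scanB n 1 ^ 3 := scanB_cube n 1
  have hmin : ∀ k, 1 ≤ k → k < scanB n 1 → k ^ 3 < n := scanB_min n 1
  have htu : scanB n 1 ≤ 1291 := by
    by_contra h
    have := hmin 1291 (by norm_num) (by omega)
    norm_num at this
    omega
  exact loopA_eq n (scanB n 1) ht1 htc hmin ((10 ^ 18 : Int) - 0).toNat 0 (10 ^ 18)
    (by norm_num) (by norm_num) (by omega) (by omega)
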